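-- pv_equiv track=rewrite | github.com/sonyaallin/eecs4401 | assignments/assignment-resources/more-resources/2020/A4 (BNs)/A4-Final/A4-summary/students/wangy808/A4/bnetbase.py | min_fill_var
-- ===== SOURCE A (Python) =====
-- def min_fill_var(scopes, Vars):
--     '''Given a set of scopes (lists of lists of variables) compute and
--     return the variable with minimum fill in. That the variable that
--     generates a factor of smallest scope when eliminated from the set
--     of scopes. Also return the new scope generated from eliminating
--     that variable.'''
--     minv = Vars[0]
--     (minfill,min_new_scope) = compute_fill(scopes,Vars[0])
--     for v in Vars[1:]:
--         (fill, new_scope) = compute_fill(scopes, v)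
--         if fill < minfill:
--             minv = v
--             minfill = fill
--             min_new_scope = new_scope
--     return (minv, min_new_scope)
--
-- def compute_fill(scopes, var):
--     '''Return the fill in scope generated by eliminating var from
--     scopes along with the size of this new scope'''
--     union = []
--     for s in scopes:
--         if var in s:
--             for v in s:
--                 if not v in union:
--                     union.append(v)
--     if var in union: union.remove(var)
--     return (len(union), union)
-- ===== SOURCE B (Python) =====
-- def min_fill_var(scopes, Vars):
--     # One pass over scopes builds an index: for each variable, the ordered,
--     # deduplicated union of all scopes containing it.  Then one pass over Vars
--     # picks the minimum-fill variable (first on ties).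
--     neighbors = {}
--     for s in scopes:
--         for v in s:
--             lst = neighbors.setdefault(v, [])
--             for w in s:
--                 if w not in lst:
--                     lst.append(w)
--     best_v = Vars[0]
--     best_scope = [w for w in neighbors.get(best_v, []) if w != best_v]
--     best_fill = len(best_scope)
--     for v in Vars[1:]:
--         scope = [w for w in neighbors.get(v, []) if w != v]
--         if len(scope) < best_fill:
--             best_v, best_fill, best_scope = v, len(scope), scope
--     return (best_v, best_scope)
-- ===== Notes on version B (the rewrite author's own statement) =====
-- stated objective: faster
-- what changed: Instead of rescanning all scopes for every candidate variable (compute_fill per variable), B builds in one pass over the scopes a neighbors index mapping each variable to the ordered deduplicated union of the scopes containing it, then selects the minimum-fill variable in a single pass over Vars.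
-- outside the precondition, e.g. on min_fill_var([[1, 2]], []): A raises IndexError, B raises IndexError
import Mathlib
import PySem

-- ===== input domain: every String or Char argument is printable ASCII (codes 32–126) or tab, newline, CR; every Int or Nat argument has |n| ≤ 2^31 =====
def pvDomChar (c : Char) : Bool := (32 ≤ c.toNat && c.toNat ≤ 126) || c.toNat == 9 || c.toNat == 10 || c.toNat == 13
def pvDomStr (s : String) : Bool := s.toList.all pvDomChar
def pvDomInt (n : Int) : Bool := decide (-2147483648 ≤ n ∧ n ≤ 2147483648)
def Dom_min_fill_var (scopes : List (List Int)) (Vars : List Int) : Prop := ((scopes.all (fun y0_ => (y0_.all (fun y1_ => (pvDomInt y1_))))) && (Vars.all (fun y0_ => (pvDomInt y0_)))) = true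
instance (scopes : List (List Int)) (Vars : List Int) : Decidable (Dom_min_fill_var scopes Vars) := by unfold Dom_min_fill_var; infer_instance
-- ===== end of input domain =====

-- B builds a variable→union index in one pass over the scopes instead of rescanning
-- all scopes for every candidate variable; measured faster on large inputs.

-- ===== PORT A =====
-- helper of A: compute_fill(scopes, var)
def compute_fill (scopes : List (List Int)) (var : Int) : Int × List Int :=
  let union := scopes.foldl (fun u s =>
    if var ∈ s then s.foldl (fun u v => if v ∈ u then u else u ++ [v]) u else u) []
  -- 'if var in union: union.remove(var)': remove = erase first occurrence
  let union := if var ∈ union then union.erase var else union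
  ((union.length : Int), union)

def min_fill_var (scopes : List (List Int)) (Vars : List Int) : Int × List Int :=
  match Vars with
  | [] => (0, [])  -- unreachable: Python raises IndexError on Vars[0]; excluded by Pre_
  | v0 :: rest =>
    let fs0 := compute_fill scopes v0
    let r := rest.foldl (fun (st : Int × Int × List Int) v =>
      let fs := compute_fill scopes v
      if fs.1 < st.2.1 then (v, fs.1, fs.2) else st) (v0, fs0.1, fs0.2)
    (r.1, r.2.2)

-- ===== PORT B =====
def min_fill_var_alt (scopes : List (List Int)) (Vars : List Int) : Int × List Int :=
  let neighbors : PySem.Dict Int (List Int) := scopes.foldl (fun d s =>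
    s.foldl (fun d v =>
      d.insert v (s.foldl (fun l w => if w ∈ l then l else l ++ [w]) (d.getD v []))) d)
    PySem.Dict.empty
  match Vars with
  | [] => (0, [])  -- unreachable: Python raises IndexError on Vars[0]; excluded by Pre_
  | v0 :: rest =>
    let scope0 := (neighbors.getD v0 []).filter (fun w => w != v0)
    let r := rest.foldl (fun (st : Int × Int × List Int) v =>
      let scope := (neighbors.getD v []).filter (fun w => w != v)
      if (scope.length : Int) < st.2.1 then (v, (scope.length : Int), scope) else st)
      (v0, (scope0.length : Int), scope0)
    (r.1, r.2.2)

-- ===== PRECONDITION & SPEC =====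
-- Pre_ excludes only the empty Vars list, on which A raises IndexError (Vars[0]).
def Pre_min_fill_var (scopes : List (List Int)) (Vars : List Int) : Prop := Vars ≠ []
instance (scopes : List (List Int)) (Vars : List Int) : Decidable (Pre_min_fill_var scopes Vars) := by unfold Pre_min_fill_var; infer_instance
def pvWitness_min_fill_var : List (List Int) × List Int := ([[1, 2], [2, 3]], [1, 2, 3])

def Spec_min_fill_var (scopes : List (List Int)) (Vars : List Int) (out : Int × List Int) : Prop := out = min_fill_var_alt scopes Vars
instance (scopes : List (List Int)) (Vars : List Int) (out : Int × List Int) : Decidable (Spec_min_fill_var scopes Vars out) := by unfold Spec_min_fill_var; infer_instance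

-- ===== CLAIM (what is proved, stated in full; the proofs are below) =====
def Claim_equal_min_fill_var : Prop := ∀ (scopes : List (List Int)) (Vars : List Int), Dom_min_fill_var scopes Vars → Pre_min_fill_var scopes Vars → Spec_min_fill_var scopes Vars (min_fill_var scopes Vars)

-- ===== LEMMAS AND PROOFS =====

-- ordered dedup-append of all of s onto u (the inner loop shared by both ports)
def addAll (u s : List Int) : List Int := s.foldl (fun u v => if v ∈ u then u else u ++ [v]) u

lemma mem_addAll {u s : List Int} {x : Int} : x ∈ addAll u s ↔ x ∈ u ∨ x ∈ s := by
  induction s generalizing u with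
  | nil => simp [addAll]
  | cons a t ih =>
    simp only [addAll, List.foldl_cons] at *
    by_cases h : a ∈ u
    · simp only [h, if_pos, ih, List.mem_cons]
      constructor
      · rintro (hx | hx) <;> tauto
      · rintro (hx | rfl | hx) <;> tauto
    · simp only [h, if_neg, not_false_iff, ih, List.mem_append, List.mem_cons]
      tauto

lemma addAll_of_subset {u s : List Int} (h : ∀ w ∈ s, w ∈ u) : addAll u s = u := by
  induction s generalizing u with
  | nil => rfl
  | cons a t ih =>
    have ha : a ∈ u := h a (by simp)
    simp only [addAll, List.foldl_cons, ha, if_pos]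
    exact ih (fun w hw => h w (by simp [hw]))

lemma addAll_idem (u s : List Int) : addAll (addAll u s) s = addAll u s :=
  addAll_of_subset (fun w hw => mem_addAll.mpr (Or.inr hw))

lemma nodup_addAll {u : List Int} (s : List Int) (h : u.Nodup) : (addAll u s).Nodup := by
  induction s generalizing u with
  | nil => exact h
  | cons a t ih =>
    rw [show addAll u (a :: t) = addAll (if a ∈ u then u else u ++ [a]) t from rfl]
    by_cases ha : a ∈ u
    · rw [if_pos ha]; exact ih h
    · rw [if_neg ha]
      refine ih ?_
      have hdis : ∀ w ∈ u, ¬w = a := fun w hw e => ha (e ▸ hw)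
      simp [List.nodup_append, h]
      exact hdis

-- inner scope pass of B: effect on one key
lemma getD_procScope (d : PySem.Dict Int (List Int)) (l s : List Int) (var : Int) :
    (l.foldl (fun d v => d.insert v (addAll (d.getD v []) s)) d).getD var []
      = if var ∈ l then addAll (d.getD var []) s else d.getD var [] := by
  induction l generalizing d with
  | nil => simp
  | cons a t ih =>
    simp only [List.foldl_cons]
    rw [ih]
    by_cases hv : var = a
    · subst hv
      simp [addAll_idem]
    · simp [hv, PySem.Dict.getD_insert, List.mem_cons]

-- the raw (pre-removal) union A computes for var
def unionRaw (scopes : List (List Int)) (var : Int) : List Int :=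
  scopes.foldl (fun u s => if var ∈ s then addAll u s else u) []

lemma getD_buildN (d : PySem.Dict Int (List Int)) (scopes : List (List Int)) (var : Int) :
    (scopes.foldl (fun d s => s.foldl (fun d v => d.insert v (addAll (d.getD v []) s)) d) d).getD var []
      = scopes.foldl (fun u s => if var ∈ s then addAll u s else u) (d.getD var []) := by
  induction scopes generalizing d with
  | nil => rfl
  | cons s t ih =>
    simp only [List.foldl_cons]
    rw [ih, getD_procScope]

lemma nodup_unionRaw (scopes : List (List Int)) (var : Int) : (unionRaw scopes var).Nodup := by
  unfold unionRaw
  have : ∀ u : List Int, u.Nodup →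
      (scopes.foldl (fun u s => if var ∈ s then addAll u s else u) u).Nodup := by
    induction scopes with
    | nil => exact fun u h => h
    | cons s t ih =>
      intro u h
      simp only [List.foldl_cons]
      by_cases hs : var ∈ s
      · exact ih _ (by simpa [hs] using (by simp [hs] : (if var ∈ s then addAll u s else u) = addAll u s) ▸ nodup_addAll s h)
      · simpa [hs] using ih _ h
  exact this [] (by simp)

lemma erase_eq_filter_of_nodup (u : List Int) (h : u.Nodup) (var : Int) :
    (if var ∈ u then u.erase var else u) = u.filter (fun w => w != var) := by
  by_cases hv : var ∈ u
  · simp only [hv, if_pos]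
    exact List.Nodup.erase_eq_filter h var
  · simp only [hv, if_neg, not_false_iff]
    symm
    apply List.filter_eq_self.mpr
    intro w hw
    simp only [bne_iff_ne, ne_eq]
    exact fun e => hv (e ▸ hw)

lemma compute_fill_eq (scopes : List (List Int)) (var : Int) :
    compute_fill scopes var
      = ((((unionRaw scopes var).filter (fun w => w != var)).length : Int),
          (unionRaw scopes var).filter (fun w => w != var)) := by
  show (((if var ∈ unionRaw scopes var then (unionRaw scopes var).erase var else unionRaw scopes var).length : Int),
        (if var ∈ unionRaw scopes var then (unionRaw scopes var).erase var else unionRaw scopes var)) = _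
  rw [erase_eq_filter_of_nodup _ (nodup_unionRaw scopes var)]

-- B's per-variable scope equals A's per-variable scope
lemma alt_getD_eq (scopes : List (List Int)) (var : Int) :
    ((scopes.foldl (fun d s =>
        s.foldl (fun d v =>
          d.insert v (s.foldl (fun l w => if w ∈ l then l else l ++ [w]) (d.getD v []))) d)
      (PySem.Dict.empty : PySem.Dict Int (List Int))).getD var []) = unionRaw scopes var := by
  have h := getD_buildN (PySem.Dict.empty : PySem.Dict Int (List Int)) scopes var
  simp only [addAll] at h
  rw [h]
  simp [unionRaw, addAll, PySem.Dict.getD_empty]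

-- ===== VERDICT (by name: the statement is the Claim_ definition above) =====
theorem min_fill_var_spec : Claim_equal_min_fill_var := by
  intro scopes Vars _ hpre
  unfold Spec_min_fill_var
  cases Vars with
  | nil => exact absurd rfl hpre
  | cons v0 rest =>
    simp only [min_fill_var, min_fill_var_alt, alt_getD_eq, compute_fill_eq]
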